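-- pv_equiv track=rewrite | github.com/InciteG/Hold-Em-Sim | card.py | vsreverse
-- ===== SOURCE A (Python) =====
-- def vsreverse(value, suit):
--     card_rank = {
--         1 : "2",
--         2: "3",
--         3: "4",
--         4: "5",
--         5: "6",
--         6: "7",
--         7: "8",
--         8: "9",
--         9: "10",
--         10: "J",
--         11: "Q",
--         12: "K",
--         13: "A"
--         }
--     card_suit = {
--         1: "H", #hearts
--         2: "D", #diamonds
--         3: "C", #clubs
--         4: "S", #spades
--         }
--     card_id = {}
--     output = 0
--     for (n,s) in card_suit.items():
--         for (r,d) in card_rank.items():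
--             num = r + 13*(n-1)
--             f = [d,s]
--             card_id[num] = f
--
--     for (k,v) in card_id.items():
--         if v == [value,suit]:
--             output = k
--
--
--     return output
-- ===== SOURCE B (Python) =====
-- def vsreverse(value, suit):
--     rank_to_num = {"2": 1, "3": 2, "4": 3, "5": 4, "6": 5, "7": 6, "8": 7,
--                    "9": 8, "10": 9, "J": 10, "Q": 11, "K": 12, "A": 13}
--     suit_to_num = {"H": 1, "D": 2, "C": 3, "S": 4}
--     if value in rank_to_num and suit in suit_to_num:
--         return rank_to_num[value] + 13 * (suit_to_num[suit] - 1)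
--     return 0
-- ===== Notes on version B (the rewrite author's own statement) =====
-- stated objective: simpler
-- what changed: Replaces building the 52-entry card_id table by a nested loop and linearly scanning it with a direct reverse lookup: two small reverse maps value->rank and suit->suit-number with a closed-form formula rank + 13*(suitnum-1), returning 0 when either key is absent.
import Mathlib
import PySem

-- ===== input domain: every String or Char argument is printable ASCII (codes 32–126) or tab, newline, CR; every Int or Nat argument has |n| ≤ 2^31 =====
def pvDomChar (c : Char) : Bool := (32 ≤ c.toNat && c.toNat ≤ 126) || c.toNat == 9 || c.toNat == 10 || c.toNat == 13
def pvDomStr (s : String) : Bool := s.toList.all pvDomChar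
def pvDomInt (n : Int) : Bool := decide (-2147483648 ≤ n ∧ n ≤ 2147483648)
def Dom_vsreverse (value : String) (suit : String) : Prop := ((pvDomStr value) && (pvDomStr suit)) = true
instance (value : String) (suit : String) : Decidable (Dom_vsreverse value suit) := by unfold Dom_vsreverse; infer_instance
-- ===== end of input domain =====

set_option maxRecDepth 100000
set_option maxHeartbeats 2000000


-- B replaces A's build-a-52-entry-table-then-scan with a direct closed-form reverse lookup in two small maps (return value only; objective: simpler).

-- ===== PORT A =====
-- Python's card_rank / card_suit dict literals (input-independent, hoisted as constants)
def pvCardRank : PySem.Dict Int String :=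
  PySem.Dict.ofList [(1, "2"), (2, "3"), (3, "4"), (4, "5"), (5, "6"), (6, "7"), (7, "8"), (8, "9"), (9, "10"), (10, "J"), (11, "Q"), (12, "K"), (13, "A")]
def pvCardSuit : PySem.Dict Int String :=
  PySem.Dict.ofList [(1, "H"), (2, "D"), (3, "C"), (4, "S")]
-- the card_id table A builds by the nested loop (input-independent, hoisted)
def pvCardId : PySem.Dict Int (List String) :=
  pvCardSuit.items.foldl (fun d ns =>
    pvCardRank.items.foldl (fun d rd =>
      d.insert (rd.1 + 13 * (ns.1 - 1)) [rd.2, ns.2]) d) PySem.Dict.empty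

def vsreverse (value : String) (suit : String) : Int :=
  pvCardId.items.foldl (fun out kv => if kv.2 == [value, suit] then kv.1 else out) 0

-- ===== PORT B =====
def pvRankToNum : PySem.Dict String Int :=
  PySem.Dict.ofList [("2", 1), ("3", 2), ("4", 3), ("5", 4), ("6", 5), ("7", 6), ("8", 7), ("9", 8), ("10", 9), ("J", 10), ("Q", 11), ("K", 12), ("A", 13)]
def pvSuitToNum : PySem.Dict String Int :=
  PySem.Dict.ofList [("H", 1), ("D", 2), ("C", 3), ("S", 4)]

def vsreverse_alt (value : String) (suit : String) : Int :=
  match pvRankToNum.get? value, pvSuitToNum.get? suit with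
  | some r, some n => r + 13 * (n - 1)
  | _, _ => 0

-- ===== PRECONDITION & SPEC =====
def Spec_vsreverse (value : String) (suit : String) (out : Int) : Prop := out = vsreverse_alt value suit
instance (value : String) (suit : String) (out : Int) : Decidable (Spec_vsreverse value suit out) := by unfold Spec_vsreverse; infer_instance

-- ===== CLAIM (what is proved, stated in full; the proofs are below) =====
def Claim_equal_vsreverse : Prop := ∀ (value : String) (suit : String), Dom_vsreverse value suit → Spec_vsreverse value suit (vsreverse value suit)

-- ===== LEMMAS AND PROOFS =====
-- evaluate the input-independent dictionaries to literals once
theorem pvCardId_items : pvCardId.items = [(1, ["2", "H"]), (2, ["3", "H"]), (3, ["4", "H"]), (4, ["5", "H"]), (5, ["6", "H"]), (6, ["7", "H"]), (7, ["8", "H"]), (8, ["9", "H"]), (9, ["10", "H"]), (10, ["J", "H"]), (11, ["Q", "H"]), (12, ["K", "H"]), (13, ["A", "H"]), (14, ["2", "D"]), (15, ["3", "D"]), (16, ["4", "D"]), (17, ["5", "D"]), (18, ["6", "D"]), (19, ["7", "D"]), (20, ["8", "D"]), (21, ["9", "D"]), (22, ["10", "D"]), (23, ["J", "D"]), (24,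 ["Q", "D"]), (25, ["K", "D"]), (26, ["A", "D"]), (27, ["2", "C"]), (28, ["3", "C"]), (29, ["4", "C"]), (30, ["5", "C"]), (31, ["6", "C"]), (32, ["7", "C"]), (33, ["8", "C"]), (34, ["9", "C"]), (35, ["10", "C"]), (36, ["J", "C"]), (37, ["Q", "C"]), (38, ["K", "C"]), (39, ["A", "C"]), (40, ["2", "S"]), (41, ["3", "S"]), (42, ["4", "S"]), (43, ["5", "S"]), (44, ["6", "S"]), (45, ["7", "S"]), (46, ["8", "S"]), (47, ["9", "S"]), (48, ["10", "S"]), (49, ["J", "S"]), (50, ["Q", "S"]), (51, ["K", "S"]), (52, ["A", "S"])] := by decide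
theorem pvRank_mk : pvRankToNum = PySem.Dict.mk [("2", 1), ("3", 2), ("4", 3), ("5", 4), ("6", 5), ("7", 6), ("8", 7), ("9", 8), ("10", 9), ("J", 10), ("Q", 11), ("K", 12), ("A", 13)] := by decide
theorem pvSuit_mk : pvSuitToNum = PySem.Dict.mk [("H", 1), ("D", 2), ("C", 3), ("S", 4)] := by decide


theorem pv_main (value suit : String) : vsreverse value suit = vsreverse_alt value suit := by
  by_cases hs0 : suit = "H"
  · subst hs0
    by_cases hv0 : value = "2"
    · subst hv0; decide
    by_cases hv1 : value = "3"
    · subst hv1; decide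
    by_cases hv2 : value = "4"
    · subst hv2; decide
    by_cases hv3 : value = "5"
    · subst hv3; decide
    by_cases hv4 : value = "6"
    · subst hv4; decide
    by_cases hv5 : value = "7"
    · subst hv5; decide
    by_cases hv6 : value = "8"
    · subst hv6; decide
    by_cases hv7 : value = "9"
    · subst hv7; decide
    by_cases hv8 : value = "10"
    · subst hv8; decide
    by_cases hv9 : value = "J"
    · subst hv9; decide
    by_cases hv10 : value = "Q"
    · subst hv10; decide
    by_cases hv11 : value = "K"
    · subst hv11; decide
    by_cases hv12 : value = "A"
    · subst hv12; decide
    simp [vsreverse, vsreverse_alt, pvCardId_items, pvRank_mk, pvSuit_mk, PySem.Dict.get?_mk_cons, PySem.Dict.get?, List.foldl, hv0, Ne.symm hv0, hv1, Ne.symm hv1, hv2, Ne.symm hv2, hv3, Ne.symm hv3, hv4, Ne.symm hv4, hv5, Ne.symm hv5, hv6, Ne.symm hv6, hv7, Ne.symm hv7, hv8, Ne.symm hv8, hv9, Ne.symm hv9, hv10, Ne.symm hv10, hv11, Ne.symm hv11, hv12, Ne.symm hv12]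
  by_cases hs1 : suit = "D"
  · subst hs1
    by_cases hv0 : value = "2"
    · subst hv0; decide
    by_cases hv1 : value = "3"
    · subst hv1; decide
    by_cases hv2 : value = "4"
    · subst hv2; decide
    by_cases hv3 : value = "5"
    · subst hv3; decide
    by_cases hv4 : value = "6"
    · subst hv4; decide
    by_cases hv5 : value = "7"
    · subst hv5; decide
    by_cases hv6 : value = "8"
    · subst hv6; decide
    by_cases hv7 : value = "9"
    · subst hv7; decide
    by_cases hv8 : value = "10"
    · subst hv8; decide
    by_cases hv9 : value = "J"
    · subst hv9; decide
    by_cases hv10 : value = "Q"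
    · subst hv10; decide
    by_cases hv11 : value = "K"
    · subst hv11; decide
    by_cases hv12 : value = "A"
    · subst hv12; decide
    simp [vsreverse, vsreverse_alt, pvCardId_items, pvRank_mk, pvSuit_mk, PySem.Dict.get?_mk_cons, PySem.Dict.get?, List.foldl, hv0, Ne.symm hv0, hv1, Ne.symm hv1, hv2, Ne.symm hv2, hv3, Ne.symm hv3, hv4, Ne.symm hv4, hv5, Ne.symm hv5, hv6, Ne.symm hv6, hv7, Ne.symm hv7, hv8, Ne.symm hv8, hv9, Ne.symm hv9, hv10, Ne.symm hv10, hv11, Ne.symm hv11, hv12, Ne.symm hv12]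
  by_cases hs2 : suit = "C"
  · subst hs2
    by_cases hv0 : value = "2"
    · subst hv0; decide
    by_cases hv1 : value = "3"
    · subst hv1; decide
    by_cases hv2 : value = "4"
    · subst hv2; decide
    by_cases hv3 : value = "5"
    · subst hv3; decide
    by_cases hv4 : value = "6"
    · subst hv4; decide
    by_cases hv5 : value = "7"
    · subst hv5; decide
    by_cases hv6 : value = "8"
    · subst hv6; decide
    by_cases hv7 : value = "9"
    · subst hv7; decide
    by_cases hv8 : value = "10"
    · subst hv8; decide
    by_cases hv9 : value = "J"
    · subst hv9; decide
    by_cases hv10 : value = "Q"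
    · subst hv10; decide
    by_cases hv11 : value = "K"
    · subst hv11; decide
    by_cases hv12 : value = "A"
    · subst hv12; decide
    simp [vsreverse, vsreverse_alt, pvCardId_items, pvRank_mk, pvSuit_mk, PySem.Dict.get?_mk_cons, PySem.Dict.get?, List.foldl, hv0, Ne.symm hv0, hv1, Ne.symm hv1, hv2, Ne.symm hv2, hv3, Ne.symm hv3, hv4, Ne.symm hv4, hv5, Ne.symm hv5, hv6, Ne.symm hv6, hv7, Ne.symm hv7, hv8, Ne.symm hv8, hv9, Ne.symm hv9, hv10, Ne.symm hv10, hv11, Ne.symm hv11, hv12, Ne.symm hv12]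
  by_cases hs3 : suit = "S"
  · subst hs3
    by_cases hv0 : value = "2"
    · subst hv0; decide
    by_cases hv1 : value = "3"
    · subst hv1; decide
    by_cases hv2 : value = "4"
    · subst hv2; decide
    by_cases hv3 : value = "5"
    · subst hv3; decide
    by_cases hv4 : value = "6"
    · subst hv4; decide
    by_cases hv5 : value = "7"
    · subst hv5; decide
    by_cases hv6 : value = "8"
    · subst hv6; decide
    by_cases hv7 : value = "9"
    · subst hv7; decide
    by_cases hv8 : value = "10"
    · subst hv8; decide
    by_cases hv9 : value = "J"
    · subst hv9; decide
    by_cases hv10 : value = "Q"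
    · subst hv10; decide
    by_cases hv11 : value = "K"
    · subst hv11; decide
    by_cases hv12 : value = "A"
    · subst hv12; decide
    simp [vsreverse, vsreverse_alt, pvCardId_items, pvRank_mk, pvSuit_mk, PySem.Dict.get?_mk_cons, PySem.Dict.get?, List.foldl, hv0, Ne.symm hv0, hv1, Ne.symm hv1, hv2, Ne.symm hv2, hv3, Ne.symm hv3, hv4, Ne.symm hv4, hv5, Ne.symm hv5, hv6, Ne.symm hv6, hv7, Ne.symm hv7, hv8, Ne.symm hv8, hv9, Ne.symm hv9, hv10, Ne.symm hv10, hv11, Ne.symm hv11, hv12, Ne.symm hv12]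
  by_cases hv0 : value = "2"
  · subst hv0; simp [vsreverse, vsreverse_alt, pvCardId_items, pvRank_mk, pvSuit_mk, PySem.Dict.get?_mk_cons, PySem.Dict.get?, List.foldl, hs0, Ne.symm hs0, hs1, Ne.symm hs1, hs2, Ne.symm hs2, hs3, Ne.symm hs3]
  by_cases hv1 : value = "3"
  · subst hv1; simp [vsreverse, vsreverse_alt, pvCardId_items, pvRank_mk, pvSuit_mk, PySem.Dict.get?_mk_cons, PySem.Dict.get?, List.foldl, hs0, Ne.symm hs0, hs1, Ne.symm hs1, hs2, Ne.symm hs2, hs3, Ne.symm hs3]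
  by_cases hv2 : value = "4"
  · subst hv2; simp [vsreverse, vsreverse_alt, pvCardId_items, pvRank_mk, pvSuit_mk, PySem.Dict.get?_mk_cons, PySem.Dict.get?, List.foldl, hs0, Ne.symm hs0, hs1, Ne.symm hs1, hs2, Ne.symm hs2, hs3, Ne.symm hs3]
  by_cases hv3 : value = "5"
  · subst hv3; simp [vsreverse, vsreverse_alt, pvCardId_items, pvRank_mk, pvSuit_mk, PySem.Dict.get?_mk_cons, PySem.Dict.get?, List.foldl, hs0, Ne.symm hs0, hs1, Ne.symm hs1, hs2, Ne.symm hs2, hs3, Ne.symm hs3]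
  by_cases hv4 : value = "6"
  · subst hv4; simp [vsreverse, vsreverse_alt, pvCardId_items, pvRank_mk, pvSuit_mk, PySem.Dict.get?_mk_cons, PySem.Dict.get?, List.foldl, hs0, Ne.symm hs0, hs1, Ne.symm hs1, hs2, Ne.symm hs2, hs3, Ne.symm hs3]
  by_cases hv5 : value = "7"
  · subst hv5; simp [vsreverse, vsreverse_alt, pvCardId_items, pvRank_mk, pvSuit_mk, PySem.Dict.get?_mk_cons, PySem.Dict.get?, List.foldl, hs0, Ne.symm hs0, hs1, Ne.symm hs1, hs2, Ne.symm hs2, hs3, Ne.symm hs3]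
  by_cases hv6 : value = "8"
  · subst hv6; simp [vsreverse, vsreverse_alt, pvCardId_items, pvRank_mk, pvSuit_mk, PySem.Dict.get?_mk_cons, PySem.Dict.get?, List.foldl, hs0, Ne.symm hs0, hs1, Ne.symm hs1, hs2, Ne.symm hs2, hs3, Ne.symm hs3]
  by_cases hv7 : value = "9"
  · subst hv7; simp [vsreverse, vsreverse_alt, pvCardId_items, pvRank_mk, pvSuit_mk, PySem.Dict.get?_mk_cons, PySem.Dict.get?, List.foldl, hs0, Ne.symm hs0, hs1, Ne.symm hs1, hs2, Ne.symm hs2, hs3, Ne.symm hs3]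
  by_cases hv8 : value = "10"
  · subst hv8; simp [vsreverse, vsreverse_alt, pvCardId_items, pvRank_mk, pvSuit_mk, PySem.Dict.get?_mk_cons, PySem.Dict.get?, List.foldl, hs0, Ne.symm hs0, hs1, Ne.symm hs1, hs2, Ne.symm hs2, hs3, Ne.symm hs3]
  by_cases hv9 : value = "J"
  · subst hv9; simp [vsreverse, vsreverse_alt, pvCardId_items, pvRank_mk, pvSuit_mk, PySem.Dict.get?_mk_cons, PySem.Dict.get?, List.foldl, hs0, Ne.symm hs0, hs1, Ne.symm hs1, hs2, Ne.symm hs2, hs3, Ne.symm hs3]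
  by_cases hv10 : value = "Q"
  · subst hv10; simp [vsreverse, vsreverse_alt, pvCardId_items, pvRank_mk, pvSuit_mk, PySem.Dict.get?_mk_cons, PySem.Dict.get?, List.foldl, hs0, Ne.symm hs0, hs1, Ne.symm hs1, hs2, Ne.symm hs2, hs3, Ne.symm hs3]
  by_cases hv11 : value = "K"
  · subst hv11; simp [vsreverse, vsreverse_alt, pvCardId_items, pvRank_mk, pvSuit_mk, PySem.Dict.get?_mk_cons, PySem.Dict.get?, List.foldl, hs0, Ne.symm hs0, hs1, Ne.symm hs1, hs2, Ne.symm hs2, hs3, Ne.symm hs3]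
  by_cases hv12 : value = "A"
  · subst hv12; simp [vsreverse, vsreverse_alt, pvCardId_items, pvRank_mk, pvSuit_mk, PySem.Dict.get?_mk_cons, PySem.Dict.get?, List.foldl, hs0, Ne.symm hs0, hs1, Ne.symm hs1, hs2, Ne.symm hs2, hs3, Ne.symm hs3]
  simp [vsreverse, vsreverse_alt, pvCardId_items, pvRank_mk, pvSuit_mk, PySem.Dict.get?_mk_cons, PySem.Dict.get?, List.foldl, hv0, Ne.symm hv0, hv1, Ne.symm hv1, hv2, Ne.symm hv2, hv3, Ne.symm hv3, hv4, Ne.symm hv4, hv5, Ne.symm hv5, hv6, Ne.symm hv6, hv7, Ne.symm hv7, hv8, Ne.symm hv8, hv9, Ne.symm hv9, hv10, Ne.symm hv10, hv11, Ne.symm hv11, hv12, Ne.symm hv12, hs0, Ne.symm hs0, hs1, Ne.symm hs1, hs2, Ne.symm hs2, hs3, Ne.symm hs3]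

-- ===== VERDICT (by name: the statement is the Claim_ definition above) =====
theorem vsreverse_spec : Claim_equal_vsreverse := by
  intro value suit _
  exact pv_main value suit
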